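-- pv_equiv track=rewrite | github.com/EnhaoLiu/optimaltree | lsopt/_base.py | _get_binbin_ranges
-- ===== SOURCE A (Python) =====
-- def _get_binbin_ranges(min, max):
--     """Get the indexes of point bins for threshold variables
--
--     min: 0
--     max: the number of possible features - 1
--     """
--
--     BIN_MAP = dict()
--
--     if max <= min:
--         return []
--     if max - min <= 1:
--         return [[[], [min, min], [max, max]]]
--
--     if min == 0 and max in BIN_MAP:
--         return BIN_MAP[max]
--
--     # print min, max
--     mid = int(float(max - min) / 2.0)
--     # if mid - min >= max - mid - 1:
--     #    mid = mid - 1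
--     result = [[[], [min, min + mid], [min + mid + 1, max]]]
--     for i in _get_binbin_ranges(min, min + mid):
--         result.extend([[[0] + i[0], i[1], i[2]]])
--     for i in _get_binbin_ranges(min + mid + 1, max):
--         result.extend([[[1] + i[0], i[1], i[2]]])
--
--     if min == 0:
--         BIN_MAP[max] = result
--
--     return result
-- ===== SOURCE B (Python) =====
-- def _get_binbin_ranges(min, max):
--     """Iterative (explicit-stack) pre-order construction of the balanced-split
--     range descriptors over [min, max]."""
--     result = []
--     stack = [(min, max, [])]
--     while stack:
--         lo, hi, path = stack.pop()
--         if hi <= lo: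
--             continue
--         if hi - lo <= 1:
--             result.append([path, [lo, lo], [hi, hi]])
--             continue
--         mid = (hi - lo) // 2
--         result.append([path, [lo, lo + mid], [lo + mid + 1, hi]])
--         # push right first so the left child is processed (emitted) first
--         stack.append((lo + mid + 1, hi, path + [1]))
--         stack.append((lo, lo + mid, path + [0]))
--     return result
-- ===== Notes on version B (the rewrite author's own statement) =====
-- stated objective: alternative
-- what changed: Replaced the recursion (with bottom-up path prefixing and list-extend of mapped recursive results) by an explicit stack of (lo, hi, path) frames with top-down path accumulation, pushing the right child before the left to reproduce the pre-order emission; the dead BIN_MAP cache is dropped.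
import Mathlib
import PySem

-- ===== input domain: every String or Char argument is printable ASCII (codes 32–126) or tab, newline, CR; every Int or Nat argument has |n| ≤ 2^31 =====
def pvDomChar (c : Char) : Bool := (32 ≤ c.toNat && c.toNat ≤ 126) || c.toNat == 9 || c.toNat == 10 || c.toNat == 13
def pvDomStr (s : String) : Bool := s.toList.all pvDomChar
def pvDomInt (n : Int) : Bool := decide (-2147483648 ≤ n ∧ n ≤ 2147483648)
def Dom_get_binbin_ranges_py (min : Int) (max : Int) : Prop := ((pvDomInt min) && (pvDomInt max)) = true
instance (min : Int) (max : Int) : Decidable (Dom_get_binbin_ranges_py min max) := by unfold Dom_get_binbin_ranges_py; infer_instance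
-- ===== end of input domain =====

-- B replaces A's recursion by an explicit stack with top-down path accumulation (alternative decomposition, same cost).

-- ===== PORT A =====
-- The dead BIN_MAP cache (always freshly empty, never hit) has no observable effect and is not ported.
-- 'int(float(max - min) / 2.0)' is exact integer halving here: in this branch 2 ≤ max - min ≤ 2^32,
-- so the float quotient is exact and truncation equals floor division; ported as `(max - min) / 2`.
def get_binbin_ranges_py (min : Int) (max : Int) : List (List (List Int)) :=
  if max ≤ min then []
  else if max - min ≤ 1 then [[[], [min, min], [max, max]]]
  else
    ([[[], [min, min + (max - min) / 2], [min + (max - min) / 2 + 1, max]]]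
      ++ (get_binbin_ranges_py min (min + (max - min) / 2)).map
           (fun i => [[(0 : Int)] ++ i.headD [], i.getD 1 [], i.getD 2 []])
      ++ (get_binbin_ranges_py (min + (max - min) / 2 + 1) max).map
           (fun i => [[(1 : Int)] ++ i.headD [], i.getD 1 [], i.getD 2 []]))
termination_by (max - min).toNat
decreasing_by all_goals (simp_wf; omega)

-- ===== PORT B =====
-- frame size measure used only for termination of the stack loop
def pvFrameW (f : Int × Int × List Int) : Nat := 2 * (f.2.1 - f.1).toNat + 1

def pvAltGo : List (Int × Int × List Int) → List (List (List Int))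
  | [] => []
  | (lo, hi, path) :: rest =>
    if hi ≤ lo then pvAltGo rest
    else if hi - lo ≤ 1 then [path, [lo, lo], [hi, hi]] :: pvAltGo rest
    else
      [path, [lo, lo + (hi - lo) / 2], [lo + (hi - lo) / 2 + 1, hi]]
        :: pvAltGo ((lo, lo + (hi - lo) / 2, path ++ [0]) :: (lo + (hi - lo) / 2 + 1, hi, path ++ [1]) :: rest)
termination_by stack => (stack.map pvFrameW).sum
decreasing_by all_goals (simp [pvFrameW] <;> omega)

def get_binbin_ranges_py_alt (min : Int) (max : Int) : List (List (List Int)) :=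
  pvAltGo [(min, max, [])]

-- ===== PRECONDITION & SPEC =====
def Spec_get_binbin_ranges_py (min : Int) (max : Int) (out : List (List (List Int))) : Prop := out = get_binbin_ranges_py_alt min max
instance (min : Int) (max : Int) (out : List (List (List Int))) : Decidable (Spec_get_binbin_ranges_py min max out) := by unfold Spec_get_binbin_ranges_py; infer_instance

-- ===== CLAIM (what is proved, stated in full; the proofs are below) =====
def Claim_equal_get_binbin_ranges_py : Prop := ∀ (min : Int) (max : Int), Dom_get_binbin_ranges_py min max → Spec_get_binbin_ranges_py min max (get_binbin_ranges_py min max)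

-- ===== LEMMAS AND PROOFS =====

-- every row A produces is a 3-element list [path, r1, r2]
theorem pv_shape (mn mx : Int) :
    ∀ i ∈ get_binbin_ranges_py mn mx, ∃ p a b, i = [p, a, b] := by
  have h : ∀ n mn mx, (mx - mn).toNat = n →
      ∀ i ∈ get_binbin_ranges_py mn mx, ∃ p a b, i = [p, a, b] := by
    intro n
    induction n using Nat.strong_induction_on with
    | _ n ih =>
      intro mn mx hn i hi
      rw [get_binbin_ranges_py] at hi
      split_ifs at hi with h1 h2
      · simp at hi
      · simp at hi; exact ⟨[], [mn, mn], [mx, mx], hi⟩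
      · simp only [List.mem_append, List.mem_map, List.mem_singleton] at hi
        rcases hi with (hi | ⟨j, hj, rfl⟩) | ⟨j, hj, rfl⟩
        · exact ⟨_, _, _, hi⟩
        · exact ⟨_, _, _, rfl⟩
        · exact ⟨_, _, _, rfl⟩
  exact h _ mn mx rfl

-- bridge: running the stack on a frame = A's rows for that interval, path-prefixed, then the rest
theorem pv_bridge (mn mx : Int) :
    ∀ (path : List Int) (rest : List (Int × Int × List Int)),
      pvAltGo ((mn, mx, path) :: rest)
        = (get_binbin_ranges_py mn mx).map
            (fun i => (path ++ i.headD []) :: i.tail) ++ pvAltGo rest := by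
  have key : ∀ n mn mx, (mx - mn).toNat = n →
      ∀ (path : List Int) (rest : List (Int × Int × List Int)),
      pvAltGo ((mn, mx, path) :: rest)
        = (get_binbin_ranges_py mn mx).map
            (fun i => (path ++ i.headD []) :: i.tail) ++ pvAltGo rest := by
    intro n
    induction n using Nat.strong_induction_on with
    | _ n ih =>
      intro mn mx hn path rest
      rw [pvAltGo, get_binbin_ranges_py]
      split_ifs with h1 h2
      · simp
      · simp
      · have hmlt : (mn + (mx - mn) / 2 - mn).toNat < n := by omega
        have hrlt : (mx - (mn + (mx - mn) / 2 + 1)).toNat < n := by omega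
        rw [ih _ hmlt mn (mn + (mx - mn) / 2) rfl, ih _ hrlt (mn + (mx - mn) / 2 + 1) mx rfl]
        have hL : ∀ i ∈ get_binbin_ranges_py mn (mn + (mx - mn) / 2),
            ((fun i => (path ++ i.headD []) :: i.tail) ∘
              fun i => [[(0 : Int)] ++ i.headD [], i.getD 1 [], i.getD 2 []]) i
              = (fun i => ((path ++ [0]) ++ i.headD []) :: i.tail) i := by
          intro i hi
          obtain ⟨p, a, b, rfl⟩ := pv_shape mn (mn + (mx - mn) / 2) i hi
          simp
        have hR : ∀ i ∈ get_binbin_ranges_py (mn + (mx - mn) / 2 + 1) mx,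
            ((fun i => (path ++ i.headD []) :: i.tail) ∘
              fun i => [[(1 : Int)] ++ i.headD [], i.getD 1 [], i.getD 2 []]) i
              = (fun i => ((path ++ [1]) ++ i.headD []) :: i.tail) i := by
          intro i hi
          obtain ⟨p, a, b, rfl⟩ := pv_shape (mn + (mx - mn) / 2 + 1) mx i hi
          simp
        simp only [List.map_append, List.map_map, List.append_assoc, List.map_cons,
          List.map_congr_left hL, List.map_congr_left hR]
        simp
  exact key _ mn mx rfl

-- ===== VERDICT (by name: the statement is the Claim_ definition above) =====
theorem get_binbin_ranges_py_spec : Claim_equal_get_binbin_ranges_py := by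
  intro mn mx _
  unfold Spec_get_binbin_ranges_py get_binbin_ranges_py_alt
  rw [pv_bridge]
  simp only [pvAltGo, List.append_nil, List.nil_append]
  conv_lhs => rw [show get_binbin_ranges_py mn mx
    = (get_binbin_ranges_py mn mx).map id from (List.map_id _).symm]
  apply List.map_congr_left
  intro i hi
  obtain ⟨p, a, b, rfl⟩ := pv_shape mn mx i hi
  simp
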